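-- pv_equiv track=rewrite | github.com/EmilMachine/pyplan | read_and_present_data_1.py | task_possible
-- ===== SOURCE A (Python) =====
-- def intersect(t1,t2):
--     return list(set(t1) & set(t2))
--
-- def task_possible(tasks):
--     pos_tasks = []
--     for actor_list in tasks:
--         if not actor_list: #not actor_list = list is empty
--             pos_tasks.append([])
--         else:
--             tmp_list = []
--             for i,al2 in enumerate(tasks):
--                 # Check if acotor list_is not empty and does not have actor overlap
--                 # TODO: FIX problem that int (1 entry) is not iterable
--                 if al2 and not(intersect(actor_list,al2)):
--                     tmp_list.append(i)
--             pos_tasks.append(tmp_list)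
--     return pos_tasks
-- ===== SOURCE B (Python) =====
-- def task_possible(tasks):
--     # inverted index: actor -> list of indices of tasks containing that actor
--     pairs = [(a, i) for i, t in enumerate(tasks) for a in t]
--     inv = {}
--     for a, i in pairs:
--         inv.setdefault(a, []).append(i)
--     nonempty = [i for i, t in enumerate(tasks) if t]
--     out = []
--     for t in tasks:
--         if not t:
--             out.append([])
--         else:
--             bad = set()
--             for a in t:
--                 bad.update(inv.get(a, []))
--             out.append([i for i in nonempty if i not in bad])
--     return out
-- ===== Notes on version B (the rewrite author's own statement) =====
-- stated objective: faster
-- what changed: Replaces A's all-pairs scan (for every task, intersect with every other task) by an inverted index actor->task-indices built once; each task's answer is the precomputed non-empty indices minus the set of indices its actors map to.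
import Mathlib
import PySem

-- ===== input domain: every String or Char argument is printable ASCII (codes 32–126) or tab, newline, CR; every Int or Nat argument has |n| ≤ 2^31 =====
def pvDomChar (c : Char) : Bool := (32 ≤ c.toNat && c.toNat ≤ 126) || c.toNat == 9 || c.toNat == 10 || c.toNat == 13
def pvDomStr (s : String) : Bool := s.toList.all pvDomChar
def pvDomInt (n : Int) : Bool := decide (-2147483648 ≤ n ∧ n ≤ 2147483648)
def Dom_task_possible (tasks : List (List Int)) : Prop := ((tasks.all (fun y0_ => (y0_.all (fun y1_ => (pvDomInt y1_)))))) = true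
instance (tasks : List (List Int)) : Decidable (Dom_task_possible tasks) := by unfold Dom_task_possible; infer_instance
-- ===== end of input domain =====

-- B replaces A's quadratic all-pairs intersection scan by an inverted index
-- actor → task indices: per task the overlapping indices are collected from the
-- index and the answer is the precomputed non-empty indices minus that set.

-- ===== PORT A =====
-- intersect(t1,t2) = list(set(t1) & set(t2))
def pvIntersect (t1 t2 : List Int) : List Int :=
  PySem.Set.inter (PySem.Set.ofList t1) (PySem.Set.ofList t2)

def task_possible (tasks : List (List Int)) : List (List Int) :=
  tasks.foldl (fun pos_tasks actor_list =>
    if actor_list = [] then pos_tasks ++ [[]]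
    else pos_tasks ++ [(PySem.List.enumerate tasks).foldl
      (fun tmp_list p =>
        if p.2 ≠ [] ∧ pvIntersect actor_list p.2 = [] then tmp_list ++ [p.1] else tmp_list)
      []]) []

-- ===== PORT B =====
-- pairs = [(a, i) for i, t in enumerate(tasks) for a in t]
def pvPairs (tasks : List (List Int)) : List (Int × Int) :=
  (PySem.List.enumerate tasks).flatMap (fun p => p.2.map (fun a => (a, p.1)))

-- inv = {}; for a, i in pairs: inv.setdefault(a, []).append(i)
def pvInv (tasks : List (List Int)) : PySem.Dict Int (List Int) :=
  (pvPairs tasks).foldl (fun d q => d.modify q.1 [] (fun x => x ++ [q.2])) PySem.Dict.empty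

-- nonempty = [i for i, t in enumerate(tasks) if t]
def pvNonempty (tasks : List (List Int)) : List Int :=
  ((PySem.List.enumerate tasks).filter (fun p => p.2 ≠ [])).map (fun p => p.1)

-- bad = set(); for a in t: bad.update(inv.get(a, []))
def pvBad (inv : PySem.Dict Int (List Int)) (t : List Int) : PySem.Set Int :=
  t.foldl (fun s a => PySem.Set.update s (inv.getD a [])) PySem.Set.empty

def task_possible_alt (tasks : List (List Int)) : List (List Int) :=
  let inv := pvInv tasks
  let ne := pvNonempty tasks
  tasks.foldl (fun out t =>
    if t = [] then out ++ [[]]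
    else out ++ [ne.filter (fun i => !(PySem.Set.contains (pvBad inv t) i))]) []

-- ===== PRECONDITION & SPEC =====
def Spec_task_possible (tasks : List (List Int)) (out : List (List Int)) : Prop := out = task_possible_alt tasks
instance (tasks : List (List Int)) (out : List (List Int)) : Decidable (Spec_task_possible tasks out) := by unfold Spec_task_possible; infer_instance

-- ===== CLAIM (what is proved, stated in full; the proofs are below) =====
def Claim_equal_task_possible : Prop := ∀ (tasks : List (List Int)), Dom_task_possible tasks → Spec_task_possible tasks (task_possible tasks)

-- ===== LEMMAS AND PROOFS =====

-- membership in the union-of-updates set bad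
theorem mem_pvBad (inv : PySem.Dict Int (List Int)) (t : List Int) (y : Int) :
    y ∈ pvBad inv t ↔ ∃ a ∈ t, y ∈ inv.getD a [] := by
  unfold pvBad
  suffices h : ∀ (s : PySem.Set Int) (l : List Int),
      y ∈ l.foldl (fun s a => PySem.Set.update s (inv.getD a [])) s ↔ y ∈ s ∨ ∃ a ∈ l, y ∈ inv.getD a [] by
    simpa [PySem.Set.empty] using h PySem.Set.empty t
  intro s l
  induction l generalizing s with
  | nil => simp
  | cons a l ih => simp [List.foldl_cons, ih, PySem.Set.mem_update]; tauto

-- the inverted index lists exactly the tasks containing an actor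
theorem mem_getD_pvInv (tasks : List (List Int)) (a i : Int) :
    i ∈ (pvInv tasks).getD a [] ↔ ∃ (k : Nat) (h : k < tasks.length), i = (k : Int) ∧ a ∈ tasks[k] := by
  unfold pvInv pvPairs
  rw [PySem.Dict.getD_foldl_modify_append]
  have hz : (PySem.Dict.empty : PySem.Dict Int (List Int)).getD a [] = [] := by simp [pysem]
  rw [hz, List.nil_append]
  constructor
  · intro h
    simp only [List.mem_map, List.mem_filter, List.mem_flatMap] at h
    obtain ⟨q, ⟨⟨p, hp, hq⟩, hk⟩, rfl⟩ := h
    obtain ⟨k, hk', rfl⟩ := (PySem.List.mem_enumerate_iff _ _ _).1 hp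
    obtain ⟨b, hb, rfl⟩ := hq
    simp only [beq_iff_eq] at hk
    subst hk
    exact ⟨k, hk', by simp, hb⟩
  · rintro ⟨k, hk, rfl, ha⟩
    simp only [List.mem_map, List.mem_filter, List.mem_flatMap]
    refine ⟨(a, (k : Int)), ⟨⟨((k : Int), tasks[k]), ?_, ?_⟩, by simp⟩, rfl⟩
    · exact (PySem.List.mem_enumerate_iff _ _ _).2 ⟨k, hk, by simp⟩
    · exact ⟨a, ha, rfl⟩

-- emptiness of set-intersection is disjointness
theorem pvIntersect_eq_nil (t u : List Int) :
    pvIntersect t u = [] ↔ ∀ a ∈ t, a ∉ u := by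
  unfold pvIntersect
  rw [List.eq_nil_iff_forall_not_mem]
  constructor
  · intro h a ha hu
    exact h a ((PySem.Set.mem_inter _ _ a).2 ⟨(PySem.Set.mem_ofList _ _).2 ha, (PySem.Set.mem_ofList _ _).2 hu⟩)
  · intro h a ha
    obtain ⟨h1, h2⟩ := (PySem.Set.mem_inter _ _ a).1 ha
    exact h a ((PySem.Set.mem_ofList _ _).1 h1) ((PySem.Set.mem_ofList _ _).1 h2)

-- the per-task inner lists agree
theorem inner_eq (tasks : List (List Int)) (t : List Int) :
    (PySem.List.enumerate tasks).foldl
      (fun tmp_list p =>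
        if p.2 ≠ [] ∧ pvIntersect t p.2 = [] then tmp_list ++ [p.1] else tmp_list) []
    = (pvNonempty tasks).filter (fun i => !(PySem.Set.contains (pvBad (pvInv tasks) t) i)) := by
  have hA : (PySem.List.enumerate tasks).foldl
      (fun tmp_list p =>
        if p.2 ≠ [] ∧ pvIntersect t p.2 = [] then tmp_list ++ [p.1] else tmp_list) []
      = ((PySem.List.enumerate tasks).filter
          (fun p => decide (p.2 ≠ [] ∧ pvIntersect t p.2 = []))).map (fun p => p.1) := by
    have := PySem.List.foldl_append_if
      (fun (p : Int × List Int) => decide (p.2 ≠ [] ∧ pvIntersect t p.2 = []))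
      (fun p => p.1) (PySem.List.enumerate tasks) []
    simpa using this
  rw [hA]
  unfold pvNonempty
  rw [List.filter_map, List.filter_filter]
  refine congrArg _ (List.filter_congr ?_)
  intro p hp
  obtain ⟨k, hk, rfl⟩ := (PySem.List.mem_enumerate_iff _ _ _).1 hp
  simp only [zero_add, Function.comp]
  by_cases hne : tasks[k] = []
  · simp [hne]
  · have hbad : ((k : Int) ∈ pvBad (pvInv tasks) t) ↔ ¬ pvIntersect t tasks[k] = [] := by
      rw [mem_pvBad, pvIntersect_eq_nil]
      constructor
      · rintro ⟨a, ha, hi⟩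
        obtain ⟨k', hk', hkk, ha'⟩ := (mem_getD_pvInv tasks a (k : Int)).1 hi
        have : k = k' := by exact_mod_cast hkk
        subst this
        intro h; exact h a ha ha'
      · intro h
        push Not at h
        obtain ⟨a, ha, ha'⟩ := h
        exact ⟨a, ha, (mem_getD_pvInv tasks a (k : Int)).2 ⟨k, hk, rfl, ha'⟩⟩
    by_cases hd : pvIntersect t tasks[k] = []
    · have : ¬ ((k : Int) ∈ pvBad (pvInv tasks) t) := by rw [hbad]; simpa using hd
      simp [hne, hd, this]
    · have : (k : Int) ∈ pvBad (pvInv tasks) t := hbad.2 hd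
      simp [hne, hd, this]

-- ===== VERDICT (by name: the statement is the Claim_ definition above) =====
theorem task_possible_spec : Claim_equal_task_possible := by
  intro tasks _
  unfold Spec_task_possible task_possible task_possible_alt
  have hf : (fun (pos_tasks : List (List Int)) (actor_list : List Int) =>
      if actor_list = [] then pos_tasks ++ [[]]
      else pos_tasks ++ [(PySem.List.enumerate tasks).foldl
        (fun tmp_list p =>
          if p.2 ≠ [] ∧ pvIntersect actor_list p.2 = [] then tmp_list ++ [p.1] else tmp_list)
        []])
      = (fun (out : List (List Int)) (t : List Int) =>
      if t = [] then out ++ [[]]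
      else out ++ [(pvNonempty tasks).filter
        (fun i => !(PySem.Set.contains (pvBad (pvInv tasks) t) i))]) := by
    funext acc t
    by_cases h : t = [] <;> simp [h, inner_eq]
  simp only [hf]
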